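-- pv_equiv track=rewrite | github.com/romain-li/leetcode | problems/0003_Longest_Substring_Without_Repeating_Characters/solution.py | prev_map
-- ===== SOURCE A (Python) =====
-- def prev_map(s):
--     """
--     Generate the previous character position map.
--     For example: "abcabcbb" -> [None, None, None, 0, 1, 2, 4, 6]
--     """
--     prev_map = []
--     char_map = {}
--     for i, c in enumerate(s):
--         prev = char_map.get(c)
--         char_map[c] = i
--         prev_map.append(prev)
--     return prev_map
-- ===== SOURCE B (Python) =====
-- def prev_map(s):
--     """
--     Generate the previous character position map.
--     For example: "abcabcbb" -> [None, None, None, 0, 1, 2, 4, 6]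
--     """
--     res = []
--     for i in range(len(s)):
--         prev = None
--         for j in range(i - 1, -1, -1):
--             if s[j] == s[i]:
--                 prev = j
--                 break
--         res.append(prev)
--     return res
-- ===== Notes on version B (the rewrite author's own statement) =====
-- stated objective: alternative
-- what changed: Replaces the single-pass hash-map of last positions with a dict-free nested backward scan: for each index i it searches s[0:i] from i-1 down to 0 for the previous occurrence of s[i].
import Mathlib
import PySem

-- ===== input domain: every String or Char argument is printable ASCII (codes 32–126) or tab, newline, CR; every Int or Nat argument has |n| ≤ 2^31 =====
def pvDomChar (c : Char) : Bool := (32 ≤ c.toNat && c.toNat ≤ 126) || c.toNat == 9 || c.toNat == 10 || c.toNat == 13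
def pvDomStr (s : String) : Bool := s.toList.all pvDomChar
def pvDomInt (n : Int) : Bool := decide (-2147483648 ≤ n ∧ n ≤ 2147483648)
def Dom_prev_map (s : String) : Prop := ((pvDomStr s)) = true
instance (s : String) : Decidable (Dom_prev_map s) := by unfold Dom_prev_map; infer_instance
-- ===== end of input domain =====

-- B replaces A's dict of last positions by a dict-free nested backward scan per index (alternative decomposition, not faster).

-- ===== PORT A =====
-- one loop iteration of A: append char_map.get(c), then char_map[c] = i
def prevStep (st : List (Option Int) × PySem.Dict Char Int) (p : Int × Char) :
    List (Option Int) × PySem.Dict Char Int :=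
  (st.1 ++ [st.2.get? p.2], st.2.insert p.2 p.1)

def prev_map (s : String) : List (Option Int) :=
  ((PySem.List.enumerate s.toList).foldl prevStep ([], PySem.Dict.empty)).1

-- ===== PORT B =====
-- B's inner loop: for j in range(i-1, -1, -1): if s[j] == s[i]: prev = j; break
def findBack (l : List Char) (c : Char) : Nat → Option Int
  | 0 => none
  | j + 1 => if l.getD j ' ' = c then some (j : Int) else findBack l c j

def prev_map_alt (s : String) : List (Option Int) :=
  (List.range s.toList.length).map (fun i => findBack s.toList (s.toList.getD i ' ') i)

-- ===== PRECONDITION & SPEC =====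
def Spec_prev_map (s : String) (out : List (Option Int)) : Prop := out = prev_map_alt s
instance (s : String) (out : List (Option Int)) : Decidable (Spec_prev_map s out) := by unfold Spec_prev_map; infer_instance

-- ===== CLAIM (what is proved, stated in full; the proofs are below) =====
def Claim_equal_prev_map : Prop := ∀ (s : String), Dom_prev_map s → Spec_prev_map s (prev_map s)

-- ===== LEMMAS AND PROOFS =====

-- findBack only inspects indices < j, so appending to the list does not change it
lemma findBack_append (l : List Char) (x c : Char) :
    ∀ j, j ≤ l.length → findBack (l ++ [x]) c j = findBack l c j := by
  intro j
  induction j with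
  | zero => intro _; rfl
  | succ j ih =>
      intro h
      have hj : j < l.length := Nat.lt_of_succ_le h
      have hget : (l ++ [x]).getD j ' ' = l.getD j ' ' := by
        simp [List.getD_eq_getElem?_getD, List.getElem?_append_left hj]
      simp only [findBack, hget, ih (Nat.le_of_lt hj)]

lemma getD_concat_length (l : List Char) (x : Char) :
    (l ++ [x]).getD l.length ' ' = x := by
  simp [List.getD_eq_getElem?_getD]

-- main loop invariant, by induction on the list from the right
lemma prev_main (l : List Char) :
    ((PySem.List.enumerate l).foldl prevStep ([], PySem.Dict.empty)).1
      = (List.range l.length).map (fun i => findBack l (l.getD i ' ') i)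
    ∧ ∀ c, ((PySem.List.enumerate l).foldl prevStep ([], PySem.Dict.empty)).2.get? c
      = findBack l c l.length := by
  induction l using List.reverseRecOn with
  | nil => exact ⟨rfl, fun c => rfl⟩
  | append_singleton l x ih =>
      obtain ⟨ih1, ih2⟩ := ih
      have henum : PySem.List.enumerate (l ++ [x])
          = PySem.List.enumerate l ++ [((l.length : Int), x)] := by
        simpa using PySem.List.enumerate_append (xs := l) (ys := [x]) (s := 0)
      constructor
      · rw [henum, List.foldl_append]
        simp only [List.foldl_cons, List.foldl_nil, prevStep, ih1, ih2]
        rw [List.length_append, List.length_singleton, List.range_succ, List.map_append]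
        congr 1
        · apply List.map_congr_left
          intro i hi
          have hi' : i < l.length := List.mem_range.mp hi
          have : (l ++ [x]).getD i ' ' = l.getD i ' ' := by
            simp [List.getD_eq_getElem?_getD, List.getElem?_append_left hi']
          rw [this, findBack_append l x _ i (Nat.le_of_lt hi')]
        · simp [findBack_append l x x l.length (le_refl _)]
      · intro c
        rw [henum, List.foldl_append]
        simp only [List.foldl_cons, List.foldl_nil, prevStep]
        rw [PySem.Dict.get?_insert]
        by_cases hc : c = x
        · subst hc
          simp [findBack]
        · simp only [if_neg hc, ih2 c, List.length_append, List.length_singleton, findBack,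
            getD_concat_length]
          rw [if_neg (fun h => hc h.symm), findBack_append l x c l.length (le_refl _)]

-- ===== VERDICT (by name: the statement is the Claim_ definition above) =====
theorem prev_map_spec : Claim_equal_prev_map := by
  intro s _
  show prev_map s = prev_map_alt s
  unfold prev_map prev_map_alt
  exact (prev_main s.toList).1
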